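-- pv_equiv track=rewrite | github.com/Nik314/CaseNotionPeformance | src/optimization_framework.py | get_advanced_case_notion
-- ===== SOURCE A (Python) =====
-- def get_advanced_case_notion(activity_type_relation, type_type_relation, object_types, activities,divergence):
--     result = []
--
--     for start in object_types:
--
--         spec = set()
--
--         new_relations = {(ot,a) for (ot,a) in activity_type_relation if ot == start}
--         new_activities = set(sum([[a,b] for a,b in new_relations],[])) & activities
--         new_types = {(a,ot) for (a,ot) in activity_type_relation if a in new_activities}
--         spec = spec | new_relations | new_types
--
--         while True:
--
--             new_relations = {(ot, a) for (ot, a) in activity_type_relation if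
--                 any((b,ot) in spec and ((ot,a) not in divergence or (b,ot) not in divergence) for b in activities)}
--             new_relations = new_relations - spec
--             new_activities = set(sum([[a,b] for a,b in new_relations],[])) & activities
--             new_types = {(a, ot) for (a, ot) in activity_type_relation if a in new_activities}
--             new_types = new_types -spec
--             if new_types or new_activities:
--                 spec = spec | new_relations | new_types
--             else:
--                 break
--
--         result.append(({start},spec))
--     return result
-- ===== SOURCE B (Python) =====
-- def get_advanced_case_notion(activity_type_relation, type_type_relation, object_types, activities, divergence):
--     # Worklist-style closure: spec kept as an insertion-ordered list + membership set,
--     # with per-type trigger sets maintained incrementally, so the per-round scan over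
--     # activities disappears.
--     rel = list(activity_type_relation)
--     result = []
--     for start in object_types:
--         spec = []        # insertion-ordered distinct pairs of the closure
--         specset = set()
--         trig = set()     # types x such that (b, x) in spec for some activity b
--         trignd = set()   # same, but additionally (b, x) not in divergence
--
--         def absorb(pairs):
--             for p in pairs:
--                 if p in specset:
--                     continue
--                 specset.add(p)
--                 spec.append(p)
--                 u, v = p
--                 if u in activities:
--                     trig.add(v)
--                     if p not in divergence:
--                         trignd.add(v)
--
--         first = [p for p in rel if p[0] == start]
--         seed = {c for p in first for c in p if c in activities}
--         absorb(first)
--         absorb([p for p in rel if p[0] in seed])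
--
--         while True:
--             new_rel = [p for p in rel if p not in specset
--                        and (p[0] in trignd or (p[0] in trig and p not in divergence))]
--             acts = {c for p in new_rel for c in p if c in activities}
--             if not acts:
--                 break
--             absorb(new_rel)
--             absorb([p for p in rel if p[0] in acts])
--         result.append(({start}, set(spec)))
--     return result
-- ===== Notes on version B (the rewrite author's own statement) =====
-- stated objective: faster
-- what changed: Instead of rescanning, for every candidate relation in every round, all activities to test 'any((b,ot) in spec ...)', B maintains per-object-type trigger sets (types already reached via an activity, with and without divergence) that are updated incrementally as pairs are absorbed into the spec, so each round is a single pass over the relation with O(1) lookups.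
import Mathlib
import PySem

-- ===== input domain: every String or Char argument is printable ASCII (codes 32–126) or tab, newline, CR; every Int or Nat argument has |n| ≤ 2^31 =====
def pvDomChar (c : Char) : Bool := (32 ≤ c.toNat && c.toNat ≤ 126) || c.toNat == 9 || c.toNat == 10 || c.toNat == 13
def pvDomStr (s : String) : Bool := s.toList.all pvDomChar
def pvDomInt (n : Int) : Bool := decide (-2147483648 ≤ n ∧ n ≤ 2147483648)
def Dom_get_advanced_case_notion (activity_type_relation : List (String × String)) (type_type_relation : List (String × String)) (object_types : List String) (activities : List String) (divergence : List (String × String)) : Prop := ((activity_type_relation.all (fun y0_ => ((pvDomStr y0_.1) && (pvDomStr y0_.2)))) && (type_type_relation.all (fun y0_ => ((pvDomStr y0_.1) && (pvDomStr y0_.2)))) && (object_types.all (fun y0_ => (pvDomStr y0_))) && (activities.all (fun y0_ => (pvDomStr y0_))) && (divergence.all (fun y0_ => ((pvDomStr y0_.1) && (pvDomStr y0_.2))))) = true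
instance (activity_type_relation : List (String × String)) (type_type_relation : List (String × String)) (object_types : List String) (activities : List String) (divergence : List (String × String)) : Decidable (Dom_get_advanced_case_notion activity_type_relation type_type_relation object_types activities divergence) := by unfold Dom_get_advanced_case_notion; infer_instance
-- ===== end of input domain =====

-- B replaces A's per-round rescan of all activities by incrementally maintained per-type
-- trigger sets and a spec membership set (objective: faster; return value equivalence proved).


-- ===== PORT A =====
-- the 'while True' loop; fuel = |R|+1 only makes the recursion total (spec grows every round)
def pvAloop (R div : List (String × String)) (activities : List String) (fuel : Nat)
    (spec : PySem.Set (String × String)) : PySem.Set (String × String) :=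
  match fuel with
  | 0 => spec
  | Nat.succ fuel =>
    let new_relations := PySem.Set.diff (PySem.Set.ofList (R.filter (fun p =>
        activities.any (fun b => spec.contains (b, p.1) &&
          (!(div.contains (p.1, p.2)) || !(div.contains (b, p.1))))))) spec
    let new_activities := PySem.Set.inter
        (PySem.Set.ofList (new_relations.flatMap (fun p => [p.1, p.2]))) activities
    let new_types := PySem.Set.diff
        (PySem.Set.ofList (R.filter (fun p => new_activities.contains p.1))) spec
    if new_types.isEmpty && new_activities.isEmpty then spec
    else pvAloop R div activities fuel
      (PySem.Set.union (PySem.Set.union spec new_relations) new_types)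

-- the code before the while loop (spec = set(); the first new_relations/new_activities/new_types)
def pvAinit (R : List (String × String)) (activities : List String) (start : String) :
    PySem.Set (String × String) :=
  let new_relations := PySem.Set.ofList (R.filter (fun p => p.1 == start))
  let new_activities := PySem.Set.inter
      (PySem.Set.ofList (new_relations.flatMap (fun p => [p.1, p.2]))) activities
  let new_types := PySem.Set.ofList (R.filter (fun p => new_activities.contains p.1))
  PySem.Set.union (PySem.Set.union PySem.Set.empty new_relations) new_types

def get_advanced_case_notion (activity_type_relation : List (String × String)) (type_type_relation : List (String × String)) (object_types : List String) (activities : List String) (divergence : List (String × String)) : List (List String × (List (String × String))) :=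
  object_types.map (fun start =>
    ([start], pvAloop activity_type_relation divergence activities
        (activity_type_relation.length + 1)
        (pvAinit activity_type_relation activities start)))

-- ===== PORT B =====
-- Source B's absorb(): append genuinely new pairs to spec, updating the trigger sets trig/trignd
def pvBabsorb (activities : List String) (div : List (String × String))
    (st : PySem.Set (String × String) × PySem.Set String × PySem.Set String)
    (pairs : List (String × String)) :
    PySem.Set (String × String) × PySem.Set String × PySem.Set String :=
  pairs.foldl (fun st p =>
    if PySem.Set.contains st.1 p then st
    else (st.1 ++ [p],
          (if activities.contains p.1 then PySem.Set.add st.2.1 p.2 else st.2.1),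
          (if activities.contains p.1 && !(div.contains p) then PySem.Set.add st.2.2 p.2 else st.2.2))) st

-- Source B's while loop; same fuel guard as the A port (only for totality)
def pvBloop (R div : List (String × String)) (activities : List String) (fuel : Nat)
    (st : PySem.Set (String × String) × PySem.Set String × PySem.Set String) :
    PySem.Set (String × String) × PySem.Set String × PySem.Set String :=
  match fuel with
  | 0 => st
  | Nat.succ fuel =>
    let new_rel := R.filter (fun p => !(PySem.Set.contains st.1 p) &&
        (PySem.Set.contains st.2.2 p.1 ||
         (PySem.Set.contains st.2.1 p.1 && !(div.contains p))))
    let acts := PySem.Set.ofList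
        ((new_rel.flatMap (fun p => [p.1, p.2])).filter (fun c => activities.contains c))
    if acts.isEmpty then st
    else
      let st1 := pvBabsorb activities div st new_rel
      let st2 := pvBabsorb activities div st1 (R.filter (fun p => acts.contains p.1))
      pvBloop R div activities fuel st2

def get_advanced_case_notion_alt (activity_type_relation : List (String × String)) (type_type_relation : List (String × String)) (object_types : List String) (activities : List String) (divergence : List (String × String)) : List (List String × (List (String × String))) :=
  object_types.map (fun start =>
    let first := activity_type_relation.filter (fun p => p.1 == start)
    let seed := PySem.Set.ofList
        ((first.flatMap (fun p => [p.1, p.2])).filter (fun c => activities.contains c))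
    let st0 := pvBabsorb activities divergence (PySem.Set.empty, PySem.Set.empty, PySem.Set.empty) first
    let st1 := pvBabsorb activities divergence st0
        (activity_type_relation.filter (fun p => seed.contains p.1))
    ([start], (pvBloop activity_type_relation divergence activities
        (activity_type_relation.length + 1) st1).1))

-- ===== PRECONDITION & SPEC =====
def Spec_get_advanced_case_notion (activity_type_relation : List (String × String)) (type_type_relation : List (String × String)) (object_types : List String) (activities : List String) (divergence : List (String × String)) (out : List (List String × (List (String × String)))) : Prop := out = get_advanced_case_notion_alt activity_type_relation type_type_relation object_types activities divergence
instance (activity_type_relation : List (String × String)) (type_type_relation : List (String × String)) (object_types : List String) (activities : List String) (divergence : List (String × String)) (out : List (List String × (List (String × String)))) : Decidable (Spec_get_advanced_case_notion activity_type_relation type_type_relation object_types activities divergence out) := by unfold Spec_get_advanced_case_notion; infer_instance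

-- ===== CLAIM (what is proved, stated in full; the proofs are below) =====
def Claim_equal_get_advanced_case_notion : Prop := ∀ (activity_type_relation : List (String × String)) (type_type_relation : List (String × String)) (object_types : List String) (activities : List String) (divergence : List (String × String)), Dom_get_advanced_case_notion activity_type_relation type_type_relation object_types activities divergence → Spec_get_advanced_case_notion activity_type_relation type_type_relation object_types activities divergence (get_advanced_case_notion activity_type_relation type_type_relation object_types activities divergence)

-- ===== LEMMAS AND PROOFS =====

theorem pvOfList_filter {α : Type} [BEq α] [LawfulBEq α] (q : α → Bool) (l : List α) :
    PySem.Set.ofList (l.filter q) = (PySem.Set.ofList l).filter q := by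
  induction l using List.reverseRecOn with
  | nil => rfl
  | append_singleton xs x ih =>
    rw [List.filter_append, PySem.Set.ofList_append_singleton]
    by_cases hq : q x = true
    · simp only [List.filter_cons, hq, List.filter_nil, if_true]
      rw [PySem.Set.ofList_append_singleton, ih]
      by_cases hx : x ∈ PySem.Set.ofList xs
      · rw [PySem.Set.add_of_mem hx, PySem.Set.add_of_mem (by simp [List.mem_filter, hx, hq])]
      · rw [PySem.Set.add_of_not_mem hx,
            PySem.Set.add_of_not_mem (fun h => hx (List.mem_of_mem_filter h)),
            List.filter_append]
        simp [hq]
    · rw [show [x].filter q = ([] : List α) by simp [hq], List.append_nil, ih]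
      by_cases hx : x ∈ PySem.Set.ofList xs
      · rw [PySem.Set.add_of_mem hx]
      · rw [PySem.Set.add_of_not_mem hx, List.filter_append]
        simp [hq]

theorem pvContains_congr {α : Type} [BEq α] [LawfulBEq α] (s t : List α)
    (h : ∀ x, x ∈ s ↔ x ∈ t) (x : α) : s.contains x = t.contains x := by
  rw [Bool.eq_iff_iff]
  simp only [List.contains_iff_mem]
  exact h x

theorem pvUpdate_ofList {α : Type} [BEq α] [LawfulBEq α] (s : PySem.Set α) (l : List α) :
    PySem.Set.update s (PySem.Set.ofList l) = PySem.Set.update s l := by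
  rw [PySem.Set.update_eq_append_filter, PySem.Set.update_eq_append_filter,
      PySem.Set.ofList_ofList]
def pvTrigInv (act : List String) (s : List (String × String)) (t : List String) : Prop :=
  ∀ x, x ∈ t ↔ ∃ u, (u, x) ∈ s ∧ u ∈ act
def pvTrigNDInv (act : List String) (div : List (String × String))
    (s : List (String × String)) (n : List String) : Prop :=
  ∀ x, x ∈ n ↔ ∃ u, (u, x) ∈ s ∧ u ∈ act ∧ (u, x) ∉ div

theorem pvBabsorb_spec (act : List String) (div : List (String × String)) :
    ∀ (pairs : List (String × String)) (s : PySem.Set (String × String)) (t n : PySem.Set String),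
    pvTrigInv act s t → pvTrigNDInv act div s n →
    (pvBabsorb act div (s, t, n) pairs).1 = PySem.Set.update s pairs ∧
    pvTrigInv act (PySem.Set.update s pairs) (pvBabsorb act div (s, t, n) pairs).2.1 ∧
    pvTrigNDInv act div (PySem.Set.update s pairs) (pvBabsorb act div (s, t, n) pairs).2.2 := by
  intro pairs
  induction pairs with
  | nil =>
    intro s t n ht hn
    simpa [pvBabsorb, PySem.Set.update_nil] using ⟨ht, hn⟩
  | cons p rest ih =>
    intro s t n ht hn
    have hstep : pvBabsorb act div (s, t, n) (p :: rest) =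
        pvBabsorb act div (if PySem.Set.contains s p then (s, t, n)
          else (s ++ [p],
            (if act.contains p.1 then PySem.Set.add t p.2 else t),
            (if act.contains p.1 && !(div.contains p) then PySem.Set.add n p.2 else n))) rest := by
      simp only [pvBabsorb, List.foldl_cons]
    by_cases hc : PySem.Set.contains s p
    · have hmem : p ∈ s := List.contains_iff_mem.mp hc
      rw [hstep, if_pos hc, PySem.Set.update_cons, PySem.Set.add_of_mem hmem]
      exact ih s t n ht hn
    · have hmem : p ∉ s := fun h => hc (List.contains_iff_mem.mpr h)
      rw [hstep, if_neg hc, PySem.Set.update_cons, PySem.Set.add_of_not_mem hmem]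
      apply ih
      · -- pvTrigInv for s ++ [p]
        intro x
        constructor
        · intro hx
          by_cases ha : act.contains p.1 = true
          · rw [if_pos ha] at hx
            rcases PySem.Set.mem_add t p.2 x |>.mp hx with h | h
            · rcases (ht x).mp h with ⟨u, hu, hua⟩
              exact ⟨u, by simp [hu], hua⟩
            · exact ⟨p.1, by simp [h], List.contains_iff_mem.mp ha⟩
          · rw [if_neg ha] at hx
            rcases (ht x).mp hx with ⟨u, hu, hua⟩
            exact ⟨u, by simp [hu], hua⟩
        · rintro ⟨u, hu, hua⟩
          rcases List.mem_append.mp hu with h | h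
          · have hx : x ∈ t := (ht x).mpr ⟨u, h, hua⟩
            split <;> [exact (PySem.Set.mem_add t p.2 x).mpr (Or.inl hx); exact hx]
          · have hp : p = (u, x) := (List.mem_singleton.mp h).symm
            have ha : act.contains p.1 = true := by
              rw [hp]; exact List.contains_iff_mem.mpr hua
            rw [if_pos ha]
            exact (PySem.Set.mem_add t p.2 x).mpr (Or.inr (by rw [hp]))
      · -- pvTrigNDInv for s ++ [p]
        intro x
        constructor
        · intro hx
          by_cases ha : (act.contains p.1 && !(div.contains p)) = true
          · rw [if_pos ha] at hx
            rcases PySem.Set.mem_add n p.2 x |>.mp hx with h | h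
            · rcases (hn x).mp h with ⟨u, hu, hua, hud⟩
              exact ⟨u, by simp [hu], hua, hud⟩
            · rcases Bool.and_eq_true _ _ |>.mp ha with ⟨ha1, ha2⟩
              refine ⟨p.1, by simp [h], List.contains_iff_mem.mp ha1, ?_⟩
              have hfalse := Bool.not_eq_true' .. |>.mp ha2
              subst h
              intro hd
              rw [List.contains_iff_mem.mpr (by simpa using hd)] at hfalse
              exact Bool.true_eq_false.mp hfalse
          · rw [if_neg ha] at hx
            rcases (hn x).mp hx with ⟨u, hu, hua, hud⟩
            exact ⟨u, by simp [hu], hua, hud⟩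
        · rintro ⟨u, hu, hua, hud⟩
          rcases List.mem_append.mp hu with h | h
          · have hx : x ∈ n := (hn x).mpr ⟨u, h, hua, hud⟩
            split <;> [exact (PySem.Set.mem_add n p.2 x).mpr (Or.inl hx); exact hx]
          · have hp : p = (u, x) := (List.mem_singleton.mp h).symm
            have ha : (act.contains p.1 && !(div.contains p)) = true := by
              rw [hp]
              simp [hua, hud]
            rw [if_pos ha]
            exact (PySem.Set.mem_add n p.2 x).mpr (Or.inr (by rw [hp]))

theorem pvLoop_eq (R div : List (String × String)) (act : List String) :
    ∀ (fuel : Nat) (s : PySem.Set (String × String)) (t n : PySem.Set String),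
    s.Nodup → pvTrigInv act s t → pvTrigNDInv act div s n →
    pvAloop R div act fuel s = (pvBloop R div act fuel (s, t, n)).1 := by
  intro fuel
  induction fuel with
  | zero => intro s t n _ _ _; rfl
  | succ fuel ih =>
    intro s t n hnd ht hn
    simp only [pvAloop, pvBloop]
    set PAf := List.filter (fun p => act.any fun b => s.contains (b, p.1) && (!div.contains (p.1, p.2) || !div.contains (b, p.1))) R with hPAf
    set nrA := (PySem.Set.ofList PAf).diff s with hnrA
    set newB := List.filter (fun p => !s.contains p && (n.contains p.1 || t.contains p.1 && !div.contains p)) R with hnewB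
    set naA := (PySem.Set.ofList (List.flatMap (fun p => [p.1, p.2]) nrA)).inter act with hnaA
    set actsB := PySem.Set.ofList (List.filter (fun c => act.contains c) (List.flatMap (fun p => [p.1, p.2]) newB)) with hactsB
    set lTA := List.filter (fun p => naA.contains p.1) R with hlTA
    set lTB := List.filter (fun p => actsB.contains p.1) R with hlTB
    set ntA := (PySem.Set.ofList lTA).diff s with hntA
    -- pointwise equivalence of the round predicates
    have hPA : ∀ p : String × String, (act.any fun b => s.contains (b, p.1) && (!div.contains (p.1, p.2) || !div.contains (b, p.1))) = (n.contains p.1 || t.contains p.1 && !div.contains p) := by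
      intro p
      rw [Bool.eq_iff_iff]
      simp only [List.any_eq_true, Bool.and_eq_true, Bool.or_eq_true, Bool.not_eq_true',
        ← Bool.not_eq_true, PySem.Set.contains_eq_listContains, List.contains_iff_mem, Prod.mk.eta]
      rw [hn p.1, ht p.1]
      constructor
      · rintro ⟨b, hb, hbs, hd | hd⟩
        · exact Or.inr ⟨⟨b, hbs, hb⟩, hd⟩
        · exact Or.inl ⟨b, hbs, hb, hd⟩
      · rintro (⟨u, hus, hua, hud⟩ | ⟨⟨u, hus, hua⟩, hd⟩)
        · exact ⟨u, hua, hus, Or.inr hud⟩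
        · exact ⟨u, hua, hus, Or.inl hd⟩
    have hncont : ∀ {α : Type} [BEq α] [LawfulBEq α] (l : List α) (a : α), a ∉ l → l.contains a = false := by
      intro α _ _ l a h
      cases hc : l.contains a
      · rfl
      · exact absurd (List.contains_iff_mem.mp hc) h
    have hE1 : PySem.Set.ofList newB = nrA := by
      rw [hnrA]
      show PySem.Set.ofList newB = (PySem.Set.ofList PAf).filter (fun a => !(PySem.Set.contains s a))
      rw [← pvOfList_filter, hPAf, List.filter_filter, hnewB]
      exact congrArg PySem.Set.ofList (List.filter_congr (fun a _ => by rw [hPA a]))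
    have hmem1 : ∀ a, a ∈ newB ↔ a ∈ nrA := by
      intro a
      have h := PySem.Set.mem_ofList newB a
      rw [hE1] at h
      exact h.symm
    have hna : ∀ x, x ∈ naA ↔ x ∈ actsB := by
      intro x
      rw [hnaA, hactsB]
      rw [PySem.Set.mem_inter, PySem.Set.mem_ofList, PySem.Set.mem_ofList]
      simp only [List.mem_filter, List.mem_flatMap, List.contains_iff_mem]
      constructor
      · rintro ⟨⟨p, hp, hx⟩, hxa⟩
        exact ⟨⟨p, (hmem1 p).mpr hp, hx⟩, hxa⟩
      · rintro ⟨⟨p, hp, hx⟩, hxa⟩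
        exact ⟨⟨p, (hmem1 p).mp hp, hx⟩, hxa⟩
    have hnaC : ∀ y, PySem.Set.contains naA y = PySem.Set.contains actsB y := by
      intro y
      simpa using pvContains_congr naA actsB hna y
    have hlT : lTA = lTB := by
      rw [hlTA, hlTB]
      exact List.filter_congr (fun a _ => by rw [hnaC a.1])
    have hnilIff : naA = [] ↔ actsB = [] := by
      constructor <;> intro h <;> rw [List.eq_nil_iff_forall_not_mem] <;> intro x hx
      · exact absurd ((hna x).mpr hx) (by simp [h])
      · exact absurd ((hna x).mp hx) (by simp [h])
    have hntE : naA = [] → ntA = [] := by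
      intro h
      rw [hntA, hlTA, h]
      simp [PySem.Set.diff]
    have hbr : (List.isEmpty ntA && List.isEmpty naA) = List.isEmpty actsB := by
      by_cases h : naA = []
      · rw [hntE h, h, hnilIff.mp h]
        rfl
      · have h2 : actsB ≠ [] := fun hh => h (hnilIff.mpr hh)
        rw [Bool.eq_iff_iff]
        simp [List.isEmpty_iff, h, h2]
    rw [hbr]
    by_cases hA : List.isEmpty actsB = true
    · rw [if_pos hA, if_pos hA]
    · rw [if_neg hA, if_neg hA]
      have hA1 := pvBabsorb_spec act div newB s t n ht hn
      set st1 := pvBabsorb act div (s, t, n) newB with hst1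
      have h1s : st1.1 = PySem.Set.update s newB := hA1.1
      have invT1 : pvTrigInv act st1.1 st1.2.1 := by rw [h1s]; exact hA1.2.1
      have invN1 : pvTrigNDInv act div st1.1 st1.2.2 := by rw [h1s]; exact hA1.2.2
      have hA2 := pvBabsorb_spec act div lTB st1.1 st1.2.1 st1.2.2 invT1 invN1
      set st2 := pvBabsorb act div st1 lTB with hst2
      have h2s : st2.1 = PySem.Set.update st1.1 lTB := hA2.1
      have invT2 : pvTrigInv act st2.1 st2.2.1 := by rw [h2s]; exact hA2.2.1
      have invN2 : pvTrigNDInv act div st2.1 st2.2.2 := by rw [h2s]; exact hA2.2.2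
      -- the A-side new spec equals the B-side new spec
      have hfilters : ∀ a ∈ nrA, (!(PySem.Set.contains s a)) = true := by
        intro a ha
        have hns : a ∉ s := ((PySem.Set.mem_diff _ _ _).mp ha).2
        have e2 := hncont s a hns
        simp only [PySem.Set.contains_eq_listContains, e2]
        rfl
      have hnrAnodup : nrA.Nodup := by
        rw [hnrA]
        exact (PySem.Set.nodup_ofList PAf).filter _
      have hupd1 : PySem.Set.update s newB = s ++ nrA := by
        rw [PySem.Set.update_eq_append_filter s newB, hE1, List.filter_eq_self.mpr hfilters]
      have huni1 : PySem.Set.union s nrA = s ++ nrA := by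
        show PySem.Set.update s nrA = _
        rw [PySem.Set.update_eq_append_filter s nrA, PySem.Set.ofList_eq_self_of_nodup nrA hnrAnodup,
            List.filter_eq_self.mpr hfilters]
      have hntAnodup : ntA.Nodup := by
        rw [hntA]
        exact (PySem.Set.nodup_ofList lTA).filter _
      have huni2 : PySem.Set.union (s ++ nrA) ntA = PySem.Set.update (s ++ nrA) lTB := by
        show PySem.Set.update (s ++ nrA) ntA = _
        rw [PySem.Set.update_eq_append_filter (s ++ nrA) ntA,
            PySem.Set.update_eq_append_filter (s ++ nrA) lTB,
            PySem.Set.ofList_eq_self_of_nodup ntA hntAnodup, ← hlT]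
        congr 1
        rw [hntA]
        show ((PySem.Set.ofList lTA).filter (fun a => !(PySem.Set.contains s a))).filter _ = _
        rw [List.filter_filter]
        apply List.filter_congr
        intro a _
        by_cases h2 : a ∈ s ++ nrA
        · have e1 : List.contains (s ++ nrA) a = true := List.contains_iff_mem.mpr h2
          simp only [PySem.Set.contains_eq_listContains, e1]
          rfl
        · have hs : a ∉ s := fun h => h2 (List.mem_append.mpr (Or.inl h))
          have e1 := hncont (s ++ nrA) a h2
          have e2 := hncont s a hs
          simp only [PySem.Set.contains_eq_listContains, e1, e2]
          rfl
      have hAspec : (PySem.Set.union (PySem.Set.union s nrA) ntA) = st2.1 := by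
        rw [huni1, huni2, h2s, h1s, hupd1]
      rw [hAspec]
      have hnodup2 : List.Nodup st2.1 := by
        rw [h2s, h1s]
        exact PySem.Set.nodup_update _ _ (PySem.Set.nodup_update _ _ hnd)
      exact ih st2.1 st2.2.1 st2.2.2 hnodup2 invT2 invN2

theorem pvInit_eq (R div : List (String × String)) (act : List String) (start : String) :
    pvAinit R act start =
      (pvBabsorb act div
        (pvBabsorb act div (PySem.Set.empty, PySem.Set.empty, PySem.Set.empty)
          (R.filter (fun p => p.1 == start)))
        (R.filter (fun p => (PySem.Set.ofList
          (((R.filter (fun p => p.1 == start)).flatMap (fun p => [p.1, p.2])).filter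
            (fun c => act.contains c))).contains p.1))).1 ∧
    List.Nodup (pvBabsorb act div
        (pvBabsorb act div (PySem.Set.empty, PySem.Set.empty, PySem.Set.empty)
          (R.filter (fun p => p.1 == start)))
        (R.filter (fun p => (PySem.Set.ofList
          (((R.filter (fun p => p.1 == start)).flatMap (fun p => [p.1, p.2])).filter
            (fun c => act.contains c))).contains p.1))).1 ∧
    pvTrigInv act (pvBabsorb act div
        (pvBabsorb act div (PySem.Set.empty, PySem.Set.empty, PySem.Set.empty)
          (R.filter (fun p => p.1 == start)))
        (R.filter (fun p => (PySem.Set.ofList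
          (((R.filter (fun p => p.1 == start)).flatMap (fun p => [p.1, p.2])).filter
            (fun c => act.contains c))).contains p.1))).1
      (pvBabsorb act div
        (pvBabsorb act div (PySem.Set.empty, PySem.Set.empty, PySem.Set.empty)
          (R.filter (fun p => p.1 == start)))
        (R.filter (fun p => (PySem.Set.ofList
          (((R.filter (fun p => p.1 == start)).flatMap (fun p => [p.1, p.2])).filter
            (fun c => act.contains c))).contains p.1))).2.1 ∧
    pvTrigNDInv act div (pvBabsorb act div
        (pvBabsorb act div (PySem.Set.empty, PySem.Set.empty, PySem.Set.empty)
          (R.filter (fun p => p.1 == start)))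
        (R.filter (fun p => (PySem.Set.ofList
          (((R.filter (fun p => p.1 == start)).flatMap (fun p => [p.1, p.2])).filter
            (fun c => act.contains c))).contains p.1))).1
      (pvBabsorb act div
        (pvBabsorb act div (PySem.Set.empty, PySem.Set.empty, PySem.Set.empty)
          (R.filter (fun p => p.1 == start)))
        (R.filter (fun p => (PySem.Set.ofList
          (((R.filter (fun p => p.1 == start)).flatMap (fun p => [p.1, p.2])).filter
            (fun c => act.contains c))).contains p.1))).2.2 := by
  set first := R.filter (fun p => p.1 == start) with hfirst
  set seedB := PySem.Set.ofList ((first.flatMap (fun p => [p.1, p.2])).filter (fun c => act.contains c)) with hseedB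
  set lTB := R.filter (fun p => seedB.contains p.1) with hlTB
  have invT0 : pvTrigInv act PySem.Set.empty PySem.Set.empty := by
    intro x; simp [PySem.Set.empty]
  have invN0 : pvTrigNDInv act div PySem.Set.empty PySem.Set.empty := by
    intro x; simp [PySem.Set.empty]
  have h0 := pvBabsorb_spec act div first PySem.Set.empty PySem.Set.empty PySem.Set.empty invT0 invN0
  set st0 := pvBabsorb act div (PySem.Set.empty, PySem.Set.empty, PySem.Set.empty) first with hst0
  have h0s : st0.1 = PySem.Set.ofList first := by
    rw [h0.1]; exact PySem.Set.update_nil_left first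
  have invT0' : pvTrigInv act st0.1 st0.2.1 := by rw [h0.1]; exact h0.2.1
  have invN0' : pvTrigNDInv act div st0.1 st0.2.2 := by rw [h0.1]; exact h0.2.2
  have h1 := pvBabsorb_spec act div lTB st0.1 st0.2.1 st0.2.2 invT0' invN0'
  set st1 := pvBabsorb act div st0 lTB with hst1
  have h1s : st1.1 = PySem.Set.update st0.1 lTB := h1.1
  refine ⟨?_, ?_, ?_, ?_⟩
  · -- pvAinit equals st1.1
    simp only [pvAinit]
    rw [h1s, h0s, ← hfirst]
    -- A's initial spec
    have hu0 : PySem.Set.union PySem.Set.empty (PySem.Set.ofList first) = PySem.Set.ofList first := by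
      show PySem.Set.update ([] : PySem.Set (String × String)) (PySem.Set.ofList first) = _
      rw [PySem.Set.update_nil_left, PySem.Set.ofList_ofList]
    rw [hu0]
    show PySem.Set.update (PySem.Set.ofList first)
        (PySem.Set.ofList (R.filter (fun p => (PySem.Set.inter (PySem.Set.ofList ((PySem.Set.ofList first).flatMap (fun p => [p.1, p.2]))) act).contains p.1))) = _
    rw [pvUpdate_ofList]
    congr 1
    apply List.filter_congr
    intro a _
    have hmm : ∀ x, x ∈ PySem.Set.inter (PySem.Set.ofList ((PySem.Set.ofList first).flatMap (fun p => [p.1, p.2]))) act ↔ x ∈ seedB := by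
      intro x
      rw [PySem.Set.mem_inter, PySem.Set.mem_ofList, hseedB, PySem.Set.mem_ofList]
      simp only [List.mem_filter, List.mem_flatMap, List.contains_iff_mem, PySem.Set.mem_ofList]
    simpa using pvContains_congr _ _ hmm a.1
  · rw [h1s, h0s]
    exact PySem.Set.nodup_update _ _ (PySem.Set.nodup_ofList first)
  · rw [h1s]; exact h1.2.1
  · rw [h1s]; exact h1.2.2

-- ===== VERDICT (by name: the statement is the Claim_ definition above) =====
theorem get_advanced_case_notion_spec : Claim_equal_get_advanced_case_notion := by
  intro atr ttr ots act div _
  unfold Spec_get_advanced_case_notion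
  unfold get_advanced_case_notion get_advanced_case_notion_alt
  apply List.map_congr_left
  intro start _
  obtain ⟨h1, h2, h3, h4⟩ := pvInit_eq atr div act start
  refine congrArg (Prod.mk [start]) ?_
  rw [h1]
  exact pvLoop_eq atr div act (atr.length + 1) _ _ _ h2 h3 h4
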